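-- pv_equiv track=rewrite | github.com/hechem20/backendmath | prim.py | vrex
-- ===== SOURCE A (Python) =====
-- def ind(u, ch, m):
--     i = m
--     k = 0
--     while (k == 0) and i < len(u):
--         if u[i] == ch:
--             k = 1
--         i = i + 1
--     if k == 1:
--         return i - 1
--     else:
--         return -1
--
-- def vrex(n):
--     j = ind(n, 'x', 0)
--     k = 0
--     while j != -1 and k == 0:
--         if j + 1 == len(n) or n[j + 1] != 'p':
--             k = 1
--         j = ind(n, 'x', j + 1)
--     if k == 1:
--         return 0
--     else:
--         return 1
-- ===== SOURCE B (Python) =====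
-- def vrex(n):
--     return 1 if n.count('x') == n.count('xp') else 0
-- ===== Notes on version B (the rewrite author's own statement) =====
-- stated objective: simpler
-- what changed: replaces the find-next-index scanning loop (repeated ind calls with position bookkeeping) by comparing two substring counts, the count of the letter x and the count of the two-letter substring xp, which are equal exactly when every x is followed by p
import Mathlib
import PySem

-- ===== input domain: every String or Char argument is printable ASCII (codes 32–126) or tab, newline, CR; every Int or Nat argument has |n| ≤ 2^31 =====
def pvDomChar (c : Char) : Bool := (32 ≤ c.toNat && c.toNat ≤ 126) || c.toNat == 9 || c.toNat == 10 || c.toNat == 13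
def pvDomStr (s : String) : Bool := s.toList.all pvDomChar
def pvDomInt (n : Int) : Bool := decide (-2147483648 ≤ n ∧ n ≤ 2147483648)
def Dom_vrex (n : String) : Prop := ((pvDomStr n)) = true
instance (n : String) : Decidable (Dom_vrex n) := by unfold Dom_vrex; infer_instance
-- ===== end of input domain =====

-- B replaces A's find-next-'x' scanning loop by the substring-count test n.count('x') == n.count('xp'); simpler.

-- ===== PORT A =====
-- ind's while loop: i walks from m upward until u[i] == ch (flag k) or the end; returns the hit index or -1.
def indLoop (u : List Char) (ch : Char) (i : Nat) : Int :=
  if h : i < u.length then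
    if u[i] = ch then ((i : Int) + 1) - 1  -- k := 1; i := i + 1; return i - 1
    else indLoop u ch (i + 1)
  else -1
termination_by u.length - i

-- ind(u, ch, m); m is a found index + 1 at every call site of A, hence ≥ 0, so .toNat is exact.
def ind (u : List Char) (ch : Char) (m : Int) : Int := indLoop u ch m.toNat

-- vrex's while loop over j (fuel = len + 1 bounds the number of iterations: each found j is ≥ its start).
def vrexGo (u : List Char) (fuel : Nat) (j : Int) : Int :=
  match fuel with
  | 0 => 1
  | f + 1 =>
    if j = -1 then 1  -- loop over, k stayed 0
    else if j + 1 = (u.length : Int) ∨ ¬ (PySem.List.pyGet? u (j + 1) = some 'p') then 0  -- k := 1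
    else vrexGo u f (ind u 'x' (j + 1))

def vrex (n : String) : Int := vrexGo n.toList (n.toList.length + 1) (ind n.toList 'x' 0)

-- ===== PORT B =====
def vrex_alt (n : String) : Int :=
  if PySem.Str.count n "x" = PySem.Str.count n "xp" then 1 else 0

-- ===== PRECONDITION & SPEC =====
def Spec_vrex (n : String) (out : Int) : Prop := out = vrex_alt n
instance (n : String) (out : Int) : Decidable (Spec_vrex n out) := by unfold Spec_vrex; infer_instance

-- ===== CLAIM (what is proved, stated in full; the proofs are below) =====
def Claim_equal_vrex : Prop := ∀ (n : String), Dom_vrex n → Spec_vrex n (vrex n)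

-- ===== LEMMAS AND PROOFS =====

-- "every 'x' is followed by 'p'" — the predicate both programs decide.
def okB : List Char → Bool
  | [] => true
  | [c] => c != 'x'
  | c :: d :: r => (c != 'x' || d == 'p') && okB (d :: r)

-- non-overlapping count of the pattern "xp"
def cxp : List Char → Nat
  | c :: d :: r => if c = 'x' ∧ d = 'p' then cxp r + 1 else cxp (d :: r)
  | _ => 0

lemma okB_cons_of_ne (c : Char) (t : List Char) (h : ¬ c = 'x') :
    okB (c :: t) = okB t := by
  cases t <;> simp [okB, h]

lemma okB_x_cons (t : List Char) :
    okB ('x' :: t) = ((t.head? == some 'p') && okB t) := by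
  cases t <;> simp [okB]

lemma countGo_x (l : List Char) : ∀ (fuel acc : Nat), l.length ≤ fuel →
    PySem.Chars.count.go ['x'] fuel l acc = acc + l.count 'x' := by
  induction l with
  | nil =>
    intro fuel acc _
    cases fuel <;> simp [PySem.Chars.count.go]
  | cons c t ih =>
    intro fuel acc hf
    match fuel with
    | f + 1 =>
      by_cases hc : c = 'x'
      · have hpre : List.isPrefixOf ['x'] (c :: t) = true := by
          simp [List.isPrefixOf, hc]
        have hdrop : List.drop (List.length ['x']) (c :: t) = t := by simp
        simp only [PySem.Chars.count.go, hpre, if_pos, hdrop]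
        rw [ih f (acc + 1) (by simpa using hf)]
        simp [hc]
        omega
      · have hpre : List.isPrefixOf ['x'] (c :: t) = false := by
          simp [List.isPrefixOf]
          exact fun h => hc h.symm
        simp only [PySem.Chars.count.go, hpre]
        rw [if_neg (by simp)]
        rw [ih f acc (by simpa using hf)]
        simp [hc]

lemma countGo_xp (l : List Char) : ∀ (fuel acc : Nat), l.length ≤ fuel →
    PySem.Chars.count.go ['x', 'p'] fuel l acc = acc + cxp l := by
  induction l using cxp.induct with
  | case3 t h =>
    intro fuel acc _
    match t, h with
    | [], _ =>
      cases fuel <;> simp [PySem.Chars.count.go, cxp]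
    | [c], _ =>
      match fuel with
      | f + 1 =>
        have hpre : List.isPrefixOf ['x', 'p'] [c] = false := by
          simp [List.isPrefixOf]
        simp only [PySem.Chars.count.go, hpre]
        rw [if_neg (by simp)]
        cases f <;> simp [PySem.Chars.count.go, cxp]
    | c :: d :: r, h => exact absurd rfl (h c d r)
  | case1 c d r hcd ih =>
    intro fuel acc hf
    match fuel with
    | f + 1 =>
      obtain ⟨hc, hd⟩ := hcd
      have hpre : List.isPrefixOf ['x', 'p'] (c :: d :: r) = true := by
        simp [List.isPrefixOf, hc, hd]
      have hdrop : List.drop (List.length ['x', 'p']) (c :: d :: r) = r := by simp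
      simp only [PySem.Chars.count.go, hpre, if_pos, hdrop]
      rw [ih f (acc + 1) (by simp at hf ⊢; omega)]
      simp [cxp, hc, hd]
      omega
  | case2 c d r hcd ih =>
    intro fuel acc hf
    match fuel with
    | f + 1 =>
      have hpre : List.isPrefixOf ['x', 'p'] (c :: d :: r) = false := by
        simp [List.isPrefixOf]
        rintro h1 h2
        exact hcd ⟨h1.symm, h2.symm⟩
      simp only [PySem.Chars.count.go, hpre]
      rw [if_neg (by simp)]
      rw [ih f acc (by simp at hf ⊢; omega)]
      simp [cxp, hcd]

lemma cxp_le (l : List Char) : cxp l ≤ l.count 'x' := by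
  induction l using cxp.induct with
  | case1 c d r hcd ih =>
    obtain ⟨hc, hd⟩ := hcd
    have hdp : ¬ d = 'x' := by rw [hd]; decide
    simp [cxp, hc, hd]
    omega
  | case2 c d r hcd ih =>
    simp only [cxp, if_neg hcd]
    simp only [List.count_cons] at ih ⊢
    omega
  | case3 t h =>
    simp [cxp]

lemma count_eq_cxp_iff (l : List Char) : (l.count 'x' = cxp l) ↔ okB l = true := by
  induction l using cxp.induct with
  | case1 c d r hcd ih =>
    obtain ⟨hc, hd⟩ := hcd
    subst hc; subst hd
    have h1 : cxp ('x' :: 'p' :: r) = cxp r + 1 := by simp [cxp]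
    rw [h1, okB_x_cons, okB_cons_of_ne 'p' r (by decide)]
    simp only [List.head?_cons, beq_self_eq_true, Bool.true_and, ← ih]
    simp
  | case3 t h =>
    match t, h with
    | [], _ => simp [cxp, okB]
    | [c], _ =>
      by_cases hc : c = 'x' <;> simp [cxp, okB, hc]
    | c :: d :: r, h => exact absurd rfl (h c d r)
  | case2 c d r hcd ih =>
    simp only [cxp, if_neg hcd]
    by_cases hc : c = 'x'
    · subst hc
      have hd : ¬ d = 'p' := fun hd => hcd ⟨rfl, hd⟩
      rw [okB_x_cons]
      have hh : ((d :: r).head? == some 'p') = false := by simp [hd]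
      rw [hh]
      simp only [Bool.false_and, Bool.false_eq_true, iff_false]
      have hle := cxp_le (d :: r)
      simp [List.count_cons] at hle ⊢
      omega
    · rw [okB_cons_of_ne c (d :: r) hc, ← ih]
      simp [List.count_cons, hc]

lemma vrex_alt_eq_okB (n : String) :
    vrex_alt n = if okB n.toList then 1 else 0 := by
  have hx : PySem.Str.count n "x" = n.toList.count 'x' := by
    show PySem.Chars.count n.toList ['x'] = _
    unfold PySem.Chars.count
    simpa using countGo_x n.toList n.toList.length 0 le_rfl
  have hxp : PySem.Str.count n "xp" = cxp n.toList := by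
    show PySem.Chars.count n.toList ['x', 'p'] = _
    unfold PySem.Chars.count
    simpa using countGo_xp n.toList n.toList.length 0 le_rfl
  unfold vrex_alt
  rw [hx, hxp]
  by_cases hok : okB n.toList = true
  · rw [if_pos ((count_eq_cxp_iff n.toList).mpr hok), if_pos hok]
  · rw [if_neg (fun h => hok ((count_eq_cxp_iff n.toList).mp h)),
        if_neg (by simpa using hok)]

-- indLoop finds no 'x' at or after s iff the suffix has none
lemma indLoop_eq_neg_one_iff (u : List Char) (ch : Char) :
    ∀ s : Nat, indLoop u ch s = -1 ↔ ch ∉ u.drop s := by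
  intro s
  induction hk : u.length - s using Nat.strong_induction_on generalizing s with
  | _ k ih =>
    unfold indLoop
    by_cases h : s < u.length
    · rw [dif_pos h]
      have hdrop : u.drop s = u[s] :: u.drop (s + 1) := List.drop_eq_getElem_cons h
      by_cases hc : u[s] = ch
      · simp [hc, hdrop]
      · rw [if_neg hc, ih (u.length - (s + 1)) (by omega) (s + 1) rfl, hdrop]
        simp only [List.mem_cons, not_or]
        have hne : ¬ ch = u[s] := fun e => hc e.symm
        tauto
    · rw [dif_neg h]
      rw [List.drop_eq_nil_of_le (by omega)]
      simp

-- the main loop invariant: from search start s, A's loop decides okB of the suffix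
lemma vrexGo_ind (u : List Char) :
    ∀ k s fuel, u.length - s ≤ k → u.length + 1 - s ≤ fuel →
      vrexGo u fuel (indLoop u 'x' s) = if okB (u.drop s) then 1 else 0 := by
  intro k
  induction k with
  | zero =>
    intro s fuel hk hf
    have hs : u.length ≤ s := by omega
    have h1 : indLoop u 'x' s = -1 := by
      rw [indLoop_eq_neg_one_iff]
      rw [List.drop_eq_nil_of_le hs]; simp
    rw [h1, List.drop_eq_nil_of_le hs]
    cases fuel <;> simp [vrexGo, okB]
  | succ k ih =>
    intro s fuel hk hf
    by_cases hs : s < u.length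
    · have hdrop : u.drop s = u[s] :: u.drop (s + 1) := List.drop_eq_getElem_cons hs
      by_cases hc : u[s] = 'x'
      · have h1 : indLoop u 'x' s = (s : Int) := by
          conv_lhs => rw [indLoop.eq_def]
          rw [dif_pos hs, if_pos hc]
          omega
        rw [h1]
        obtain ⟨f, rfl⟩ : ∃ f, fuel = f + 1 := ⟨fuel - 1, by omega⟩
        · have hne : ((s : Int)) ≠ -1 := by omega
          simp only [vrexGo, if_neg hne]
          have hget : PySem.List.pyGet? u ((s : Int) + 1) = u[s + 1]? := by
            have : ((s : Int) + 1) = ((s + 1 : Nat) : Int) := by push_cast; ring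
            rw [this, PySem.List.pyGet?_natCast]
          have hhead : (u.drop (s + 1)).head? = u[s + 1]? := by
            rw [List.head?_drop]
          by_cases hbad : (s : Int) + 1 = (u.length : Int) ∨ ¬ (PySem.List.pyGet? u ((s : Int) + 1) = some 'p')
          · rw [if_pos hbad]
            have hnp : ((u.drop (s + 1)).head? == some 'p') = false := by
              rcases hbad with hb | hb
              · have : u.length ≤ s + 1 := by omega
                rw [hhead]
                simp [List.getElem?_eq_none (by omega)]
              · rw [hhead]
                simpa [hget] using hb
            rw [hdrop, hc, okB_x_cons, hnp]
            simp
          · rw [if_neg hbad]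
            obtain ⟨hb1, hb2'⟩ := not_or.mp hbad
            have hb2 := not_not.mp hb2'
            have hp : ((u.drop (s + 1)).head? == some 'p') = true := by
              rw [hhead, ← hget, hb2]; simp
            have hind : ind u 'x' ((s : Int) + 1) = indLoop u 'x' (s + 1) := by
              unfold ind
              congr 1
            rw [hind, ih (s + 1) f (by omega) (by omega)]
            rw [hdrop, hc, okB_x_cons, hp]
            simp
      · have h1 : indLoop u 'x' s = indLoop u 'x' (s + 1) := by
          conv_lhs => rw [indLoop.eq_def]
          rw [dif_pos hs, if_neg hc]
        rw [h1, ih (s + 1) fuel (by omega) (by omega), hdrop,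
            okB_cons_of_ne _ _ hc]
    · have hle : u.length ≤ s := by omega
      have h1 : indLoop u 'x' s = -1 := by
        rw [indLoop_eq_neg_one_iff, List.drop_eq_nil_of_le hle]; simp
      rw [h1, List.drop_eq_nil_of_le hle]
      cases fuel <;> simp [vrexGo, okB]

-- ===== VERDICT (by name: the statement is the Claim_ definition above) =====
theorem vrex_spec : Claim_equal_vrex := by
  intro n _
  unfold Spec_vrex
  rw [vrex_alt_eq_okB]
  unfold vrex
  have : ind n.toList 'x' 0 = indLoop n.toList 'x' 0 := rfl
  rw [this, vrexGo_ind n.toList (n.toList.length) 0 (n.toList.length + 1)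
        (by omega) (by omega)]
  simp
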